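-- pv_equiv track=rewrite | github.com/ashtok/NLP_Thesis | main/asr_mms_zeroshot_baseline.py | _filter_lexicon
-- ===== SOURCE A (Python) =====
-- from typing import Any, Dict, List, Tuple
--
-- def _filter_lexicon(lexicon: Dict[str, str], word_counts: Dict[str, int]) -> Dict[str, str]:
--     """Resolve multiple words mapping to same uroman spelling by keeping most frequent / shortest."""
--     spelling_to_words: Dict[str, List[str]] = {}
--     for w, s in lexicon.items():
--         spelling_to_words.setdefault(s, [])
--         spelling_to_words[s].append(w)
--
--     new_lex: Dict[str, str] = {}
--     for s, ws in spelling_to_words.items():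
--         if len(ws) > 1:
--             ws.sort(key=lambda w: (-word_counts[w], len(w)))
--         new_lex[ws[0]] = s
--     return new_lex
-- ===== SOURCE B (Python) =====
-- from typing import Dict
--
-- def _filter_lexicon(lexicon: Dict[str, str], word_counts: Dict[str, int]) -> Dict[str, str]:
--     """One streaming pass: keep, per uroman spelling, the best word seen so far
--     (most frequent, then shortest, earlier word wins ties)."""
--     best: Dict[str, str] = {}
--     for w, s in lexicon.items():
--         if s not in best:
--             best[s] = w
--         else:
--             b = best[s]
--             if (-word_counts[w], len(w)) < (-word_counts[b], len(b)):
--                 best[s] = w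
--     return {w: s for s, w in best.items()}
-- ===== Notes on version B (the rewrite author's own statement) =====
-- stated objective: simpler
-- what changed: Replaces A's two-phase group-then-sort (build spelling->word-list dict, stably sort each multi-word group by (-count, len), take the head) with a single streaming pass keeping one current best word per spelling, replacing it only on strict (-count, len) improvement; Pre_ additionally requires the association lists to have distinct keys (they represent Python dicts) and excludes inputs where Python A raises KeyError (a word sharing its spelling with another word but missing from word_counts), where B raises the same KeyError.
import Mathlib
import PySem

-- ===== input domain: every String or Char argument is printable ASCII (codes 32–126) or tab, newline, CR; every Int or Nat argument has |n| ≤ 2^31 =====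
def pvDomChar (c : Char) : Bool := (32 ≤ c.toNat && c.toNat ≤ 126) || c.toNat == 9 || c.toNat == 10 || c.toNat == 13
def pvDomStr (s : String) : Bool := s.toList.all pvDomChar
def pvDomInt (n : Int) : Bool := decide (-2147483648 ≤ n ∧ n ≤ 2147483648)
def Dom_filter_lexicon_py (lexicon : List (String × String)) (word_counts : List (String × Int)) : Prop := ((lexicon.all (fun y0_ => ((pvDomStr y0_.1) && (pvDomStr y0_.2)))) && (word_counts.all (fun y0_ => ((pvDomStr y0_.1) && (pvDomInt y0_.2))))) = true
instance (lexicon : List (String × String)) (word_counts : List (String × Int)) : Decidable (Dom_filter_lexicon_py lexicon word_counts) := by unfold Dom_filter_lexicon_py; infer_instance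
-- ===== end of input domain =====

-- B is a single streaming argmin pass per spelling instead of A's group-then-stable-sort; equivalence proved on dict-shaped inputs (distinct keys) where A does not raise.

-- word_counts[w]; under Pre_ the key is present wherever this value is reached, so the default is never returned
def pvCount (word_counts : List (String × Int)) (w : String) : Int :=
  ((PySem.Dict.mk word_counts).get? w).getD 0

-- ===== PORT A =====
def filter_lexicon_py (lexicon : List (String × String)) (word_counts : List (String × Int)) : List (String × String) :=
  -- spelling_to_words: setdefault(s, []) then append(w)  ==  modify s [] (· ++ [w])
  let spelling_to_words : PySem.Dict String (List String) :=
    lexicon.foldl (fun d p => d.modify p.2 [] (fun ws => ws ++ [p.1])) PySem.Dict.empty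
  let new_lex : PySem.Dict String String :=
    spelling_to_words.items.foldl (fun nl p =>
      let ws := if 1 < p.2.length then
          -- ws.sort(key=lambda w: (-word_counts[w], len(w))): stable sort with a tuple key
          PySem.List.sorted2 p.2 (fun w => -(pvCount word_counts w)) (fun w => PySem.Str.len w)
        else p.2
      nl.insert (ws.headD "") p.1) PySem.Dict.empty   -- ws[0]; every group is nonempty, so headD's default is never used
  new_lex.items

-- ===== PORT B =====
def filter_lexicon_py_alt (lexicon : List (String × String)) (word_counts : List (String × Int)) : List (String × String) :=
  let best : PySem.Dict String String :=
    lexicon.foldl (fun best p =>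
      match best.get? p.2 with
      | none => best.insert p.2 p.1
      | some b =>
        -- tuple comparison (-wc[w], len(w)) < (-wc[b], len(b)) ported as its lexicographic meaning (exact)
        if -(pvCount word_counts p.1) < -(pvCount word_counts b)
            ∨ (-(pvCount word_counts p.1) = -(pvCount word_counts b)
               ∧ PySem.Str.len p.1 < PySem.Str.len b)
        then best.insert p.2 p.1 else best) PySem.Dict.empty
  best.items.map (fun q => (q.2, q.1))

-- ===== PRECONDITION & SPEC =====
-- Pre_ (a) requires both association lists to have pairwise-distinct keys — they represent Python
-- dicts, which cannot hold a key twice, so this excludes no Python input — and (b) excludes exactly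
-- the inputs where Python A raises KeyError: a word that shares its uroman spelling with another
-- word but is absent from word_counts (B's pass raises the same KeyError there).
def Pre_filter_lexicon_py (lexicon : List (String × String)) (word_counts : List (String × Int)) : Prop :=
  (lexicon.map (fun p => p.1)).Nodup ∧ (word_counts.map (fun p => p.1)).Nodup ∧
  ∀ p ∈ lexicon, (∃ q ∈ lexicon, q.2 = p.2 ∧ q.1 ≠ p.1) → p.1 ∈ word_counts.map (fun p => p.1)
instance (lexicon : List (String × String)) (word_counts : List (String × Int)) : Decidable (Pre_filter_lexicon_py lexicon word_counts) := by unfold Pre_filter_lexicon_py; infer_instance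

def pvWitness_filter_lexicon_py : (List (String × String)) × (List (String × Int)) :=
  ([("cat", "kat"), ("kat", "kat"), ("dog", "dog")], [("cat", 5), ("kat", 2)])

def Spec_filter_lexicon_py (lexicon : List (String × String)) (word_counts : List (String × Int)) (out : List (String × String)) : Prop := out = filter_lexicon_py_alt lexicon word_counts
instance (lexicon : List (String × String)) (word_counts : List (String × Int)) (out : List (String × String)) : Decidable (Spec_filter_lexicon_py lexicon word_counts out) := by unfold Spec_filter_lexicon_py; infer_instance

-- ===== CLAIM (what is proved, stated in full; the proofs are below) =====
def Claim_equal_filter_lexicon_py : Prop := ∀ (lexicon : List (String × String)) (word_counts : List (String × Int)), Dom_filter_lexicon_py lexicon word_counts → Pre_filter_lexicon_py lexicon word_counts → Spec_filter_lexicon_py lexicon word_counts (filter_lexicon_py lexicon word_counts)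


-- ===== LEMMAS AND PROOFS =====

-- streaming step of B: keep the incumbent unless the new word is strictly better under (-count, len)
def pvStep (wc : List (String × Int)) (m : Option String) (w : String) : Option String :=
  match m with
  | none => some w
  | some b =>
    if -(pvCount wc w) < -(pvCount wc b)
        ∨ (-(pvCount wc w) = -(pvCount wc b) ∧ PySem.Str.len w < PySem.Str.len b)
    then some w else some b

def pvBest (wc : List (String × Int)) (ws : List String) : Option String :=
  ws.foldl (pvStep wc) none

def pvGroup (l : List (String × String)) (s : String) : List String :=
  (l.filter (fun p => p.2 == s)).map (fun p => p.1)

def pvBDict (wc : List (String × Int)) (l : List (String × String)) : PySem.Dict String String :=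
  l.foldl (fun best p =>
    match best.get? p.2 with
    | none => best.insert p.2 p.1
    | some b =>
      if -(pvCount wc p.1) < -(pvCount wc b)
          ∨ (-(pvCount wc p.1) = -(pvCount wc b)
             ∧ PySem.Str.len p.1 < PySem.Str.len b)
      then best.insert p.2 p.1 else best) PySem.Dict.empty

lemma alt_eq_pvBDict (l : List (String × String)) (wc : List (String × Int)) :
    filter_lexicon_py_alt l wc = (pvBDict wc l).items.map (fun q => (q.2, q.1)) := rfl

lemma pvGroup_append (l : List (String × String)) (p : String × String) (s : String) :
    pvGroup (l ++ [p]) s = pvGroup l s ++ (if p.2 == s then [p.1] else []) := by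
  simp only [pvGroup, List.filter_append, List.map_append]
  congr 1
  by_cases h : p.2 == s <;> simp [h]

lemma pvBest_append (wc : List (String × Int)) (ws : List String) (w : String) :
    pvBest wc (ws ++ [w]) = pvStep wc (pvBest wc ws) w := by
  simp [pvBest]

lemma bInv (wc : List (String × Int)) (l : List (String × String)) :
    (pvBDict wc l).keys = PySem.Set.ofList (l.map (fun p => p.2)) ∧
      ∀ s, (pvBDict wc l).get? s = pvBest wc (pvGroup l s) := by
  induction l using List.reverseRecOn with
  | nil =>
      constructor
      · rfl
      · intro s; rfl
  | append_singleton l p ih =>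
      obtain ⟨hk, hg⟩ := ih
      have hfold : pvBDict wc (l ++ [p]) =
          (match (pvBDict wc l).get? p.2 with
           | none => (pvBDict wc l).insert p.2 p.1
           | some b =>
             if -(pvCount wc p.1) < -(pvCount wc b)
                 ∨ (-(pvCount wc p.1) = -(pvCount wc b)
                    ∧ PySem.Str.len p.1 < PySem.Str.len b)
             then (pvBDict wc l).insert p.2 p.1 else pvBDict wc l) := by
        simp [pvBDict, List.foldl_append]
      have hS : PySem.Set.ofList ((l ++ [p]).map (fun p => p.2)) =
          PySem.Set.add (PySem.Set.ofList (l.map (fun p => p.2))) p.2 := by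
        simp [PySem.Set.ofList_append, PySem.Set.update_cons, PySem.Set.update_nil]
      cases hd : (pvBDict wc l).get? p.2 with
      | none =>
          have hc : (pvBDict wc l).contains p.2 = false := by
            rw [PySem.Dict.contains_eq_isSome_get?, hd]; rfl
          have hnm : p.2 ∉ PySem.Set.ofList (l.map (fun p => p.2)) := by
            rw [← hk]
            intro hmem
            have := (PySem.Dict.contains_iff_mem_keys (pvBDict wc l) p.2).mpr hmem
            simp [hc] at this
          constructor
          · rw [hfold, hd, PySem.Dict.keys_insert_of_not_contains _ _ hc, hS, hk]
            simp [PySem.Set.add, PySem.Set.contains, hnm]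
          · intro s
            rw [hfold, hd, pvGroup_append]
            by_cases hs : s = p.2
            · rw [hs, PySem.Dict.get?_insert_self]
              have h0 : pvBest wc (pvGroup l p.2) = none := by rw [← hg]; exact hd
              simp [pvBest_append, h0, pvStep]
            · rw [PySem.Dict.get?_insert_of_ne _ _ hs]
              have hbeq : (p.2 == s) = false := by simp [Ne.symm hs]
              simp [hbeq, hg s]
      | some b =>
          have hc : (pvBDict wc l).contains p.2 = true := by
            rw [PySem.Dict.contains_eq_isSome_get?, hd]; rfl
          have hmem : p.2 ∈ PySem.Set.ofList (l.map (fun p => p.2)) := by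
            rw [← hk]; exact (PySem.Dict.contains_iff_mem_keys (pvBDict wc l) p.2).mp hc
          have hadd : PySem.Set.add (PySem.Set.ofList (l.map (fun p => p.2))) p.2 =
              PySem.Set.ofList (l.map (fun p => p.2)) := by
            simp [PySem.Set.add, PySem.Set.contains, hmem]
          constructor
          · rw [hfold, hd, hS, hadd]
            dsimp only
            by_cases hcond : -(pvCount wc p.1) < -(pvCount wc b)
                ∨ (-(pvCount wc p.1) = -(pvCount wc b) ∧ PySem.Str.len p.1 < PySem.Str.len b)
            · rw [if_pos hcond, PySem.Dict.keys_insert_of_contains _ _ hc, hk]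
            · rw [if_neg hcond]; exact hk
          · intro s
            rw [hfold, hd, pvGroup_append]
            dsimp only
            by_cases hs : s = p.2
            · rw [hs]
              have h0 : pvBest wc (pvGroup l p.2) = some b := by rw [← hg]; exact hd
              rw [show (p.2 == p.2) = true by simp, if_pos rfl]
              rw [pvBest_append, h0]
              show _ = pvStep wc (some b) p.1
              unfold pvStep
              dsimp only
              by_cases hcond : -(pvCount wc p.1) < -(pvCount wc b)
                  ∨ (-(pvCount wc p.1) = -(pvCount wc b) ∧ PySem.Str.len p.1 < PySem.Str.len b)
              · rw [if_pos hcond, if_pos hcond, PySem.Dict.get?_insert_self]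
              · rw [if_neg hcond, if_neg hcond]; exact hd
            · have hbeq : (p.2 == s) = false := by simp [Ne.symm hs]
              rw [show (pvGroup l s ++ if (p.2 == s) = true then [p.1] else []) = pvGroup l s by simp [hbeq]]
              by_cases hcond : -(pvCount wc p.1) < -(pvCount wc b)
                  ∨ (-(pvCount wc p.1) = -(pvCount wc b) ∧ PySem.Str.len p.1 < PySem.Str.len b)
              · rw [if_pos hcond, PySem.Dict.get?_insert_of_ne _ _ hs]; exact hg s
              · rw [if_neg hcond]; exact hg s

lemma b_items (wc : List (String × Int)) (l : List (String × String)) :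
    filter_lexicon_py_alt l wc =
      (PySem.Set.ofList (l.map (fun p => p.2))).map
        (fun s => ((pvBest wc (pvGroup l s)).getD "", s)) := by
  obtain ⟨hk, hg⟩ := bInv wc l
  have hnd : (pvBDict wc l).keys.Nodup := by rw [hk]; exact PySem.Set.nodup_ofList _
  rw [alt_eq_pvBDict, PySem.Dict.items_eq_map_keys _ hnd "", hk, List.map_map]
  refine List.map_congr_left (fun s _ => ?_)
  simp only [Function.comp]
  rw [PySem.Dict.getD_eq_get?_getD, hg s]

-- head of an insertion sort = streaming first-minimum (the generic fold shape)
lemma head?_foldl_insertBy {α : Type} (lt : α → α → Bool) :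
    ∀ (xs acc : List α),
      (xs.foldl (fun a x => PySem.List.insertBy lt x a) acc).head? =
        xs.foldl (fun m x => match m with
          | none => some x
          | some y => if lt x y then some x else some y) acc.head? := by
  intro xs
  induction xs with
  | nil => intro acc; rfl
  | cons x xs ih =>
      intro acc
      simp only [List.foldl_cons]
      rw [ih]
      congr 1
      cases acc with
      | nil => rfl
      | cons a as =>
          show (PySem.List.insertBy lt x (a :: as)).head? = _
          unfold PySem.List.insertBy
          by_cases h : lt x a
          · simp [h]
          · simp [h]

lemma sorted2_head? (wc : List (String × Int)) (ws : List String) :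
    (PySem.List.sorted2 ws (fun w => -(pvCount wc w)) (fun w => PySem.Str.len w)).head? =
      pvBest wc ws := by
  show (ws.foldl (fun acc x => PySem.List.insertBy _ x acc) []).head? = _
  rw [head?_foldl_insertBy]
  show ws.foldl _ none = ws.foldl (pvStep wc) none
  refine PySem.List.foldl_congr_mem ws _ _ none (fun m w _ => ?_)
  cases m with
  | none => rfl
  | some b =>
      show (if ((decide (-(pvCount wc w) < -(pvCount wc b))
            || (!decide (-(pvCount wc b) < -(pvCount wc w))
                && decide (PySem.Str.len w < PySem.Str.len b))) = true)
          then some w else some b) = pvStep wc (some b) w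
      unfold pvStep
      dsimp only
      by_cases h1 : -(pvCount wc w) < -(pvCount wc b)
        <;> by_cases h2 : -(pvCount wc b) < -(pvCount wc w)
        <;> by_cases h4 : -(pvCount wc w) = -(pvCount wc b)
        <;> by_cases h3 : PySem.Str.len w < PySem.Str.len b
        <;> first
          | (exfalso; omega)
          | (simp [h1, h2, h4])

lemma pvBest_mem (wc : List (String × Int)) :
    ∀ ws : List String, ws ≠ [] → ∃ m, pvBest wc ws = some m ∧ m ∈ ws := by
  intro ws
  induction ws using List.reverseRecOn with
  | nil => intro h; exact absurd rfl h
  | append_singleton l w ih =>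
      intro _
      rw [pvBest_append]
      cases hb : pvBest wc l with
      | none => exact ⟨w, rfl, by simp⟩
      | some b =>
          have hl : l ≠ [] := by
            intro h; rw [h] at hb; simp [pvBest] at hb
          obtain ⟨m, hm, hmem⟩ := ih hl
          rw [hm] at hb
          cases hb
          unfold pvStep
          dsimp only
          by_cases hc : -(pvCount wc w) < -(pvCount wc b)
              ∨ (-(pvCount wc w) = -(pvCount wc b) ∧ PySem.Str.len w < PySem.Str.len b)
          · exact ⟨w, by rw [if_pos hc], by simp⟩
          · exact ⟨b, by rw [if_neg hc], by simp [hmem]⟩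

lemma pvSel_eq (wc : List (String × Int)) (ws : List String) (h : ws ≠ []) :
    (if 1 < ws.length then
        PySem.List.sorted2 ws (fun w => -(pvCount wc w)) (fun w => PySem.Str.len w)
      else ws).headD "" = (pvBest wc ws).getD "" := by
  by_cases hl : 1 < ws.length
  · rw [if_pos hl, List.headD_eq_head?_getD, sorted2_head?]
  · rw [if_neg hl]
    have h1 : ws.length = 1 := by
      have := List.length_pos_of_ne_nil h
      omega
    obtain ⟨w, rfl⟩ := List.length_eq_one_iff.mp h1
    simp [pvBest, pvStep]

lemma mem_pvGroup (l : List (String × String)) (s w : String) :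
    w ∈ pvGroup l s ↔ ∃ p ∈ l, p.1 = w ∧ p.2 = s := by
  simp only [pvGroup, List.mem_map, List.mem_filter, beq_iff_eq]
  constructor
  · rintro ⟨p, ⟨hp, hs⟩, hw⟩; exact ⟨p, hp, hw, hs⟩
  · rintro ⟨p, hp, hw, hs⟩; exact ⟨p, ⟨hp, hs⟩, hw⟩

lemma pvGroup_ne_nil (l : List (String × String)) (s : String)
    (h : s ∈ PySem.Set.ofList (l.map (fun p => p.2))) : pvGroup l s ≠ [] := by
  rw [PySem.Set.mem_ofList] at h
  obtain ⟨p, hp, hs⟩ := List.mem_map.mp h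
  have : p.1 ∈ pvGroup l s := (mem_pvGroup l s p.1).mpr ⟨p, hp, rfl, hs⟩
  exact List.ne_nil_of_mem this

lemma winners_nodup (wc : List (String × Int)) (l : List (String × String))
    (h : (l.map (fun p => p.1)).Nodup) :
    ((PySem.Set.ofList (l.map (fun p => p.2))).map
      (fun s => (pvBest wc (pvGroup l s)).getD "")).Nodup := by
  refine List.Nodup.map_on ?_ (PySem.Set.nodup_ofList _)
  intro s hs s' hs' heq
  obtain ⟨m, hm, hmem⟩ := pvBest_mem wc _ (pvGroup_ne_nil l s hs)
  obtain ⟨m', hm', hmem'⟩ := pvBest_mem wc _ (pvGroup_ne_nil l s' hs')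
  rw [hm] at heq; rw [hm'] at heq
  simp only [Option.getD_some] at heq
  subst heq
  obtain ⟨p, hp, hpw, hps⟩ := (mem_pvGroup l s m).mp hmem
  obtain ⟨q, hq, hqw, hqs⟩ := (mem_pvGroup l s' m).mp hmem'
  have : p = q := List.inj_on_of_nodup_map h hp hq (by rw [hpw, hqw])
  rw [← hps, ← hqs, this]

lemma a_items (wc : List (String × Int)) (l : List (String × String))
    (h : (l.map (fun p => p.1)).Nodup) :
    filter_lexicon_py l wc =
      (PySem.Set.ofList (l.map (fun p => p.2))).map
        (fun s => ((pvBest wc (pvGroup l s)).getD "", s)) := by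
  have hs2w : (l.foldl (fun d p => d.modify p.2 [] (fun ws => ws ++ [p.1]))
      (PySem.Dict.empty : PySem.Dict String (List String))).items =
      (PySem.Set.ofList (l.map (fun p => p.2))).map (fun s => (s, pvGroup l s)) := by
    have hkeys : (l.foldl (fun d p => d.modify p.2 [] (fun ws => ws ++ [p.1]))
        (PySem.Dict.empty : PySem.Dict String (List String))).keys =
        PySem.Set.ofList (l.map (fun p => p.2)) := by
      rw [PySem.Dict.keys_foldl_modify_key l (fun p => p.2) []
        (fun _ p => fun ws => ws ++ [p.1]) PySem.Dict.empty]
      rw [PySem.Dict.keys_empty, PySem.Set.update_nil_left]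
    have hgetD : ∀ s, (l.foldl (fun d p => d.modify p.2 [] (fun ws => ws ++ [p.1]))
        (PySem.Dict.empty : PySem.Dict String (List String))).getD s [] = pvGroup l s := by
      intro s
      rw [show (l.foldl (fun d p => d.modify p.2 [] (fun ws => ws ++ [p.1]))
          (PySem.Dict.empty : PySem.Dict String (List String))) =
          ((l.map (fun p => (p.2, p.1))).foldl (fun d q => d.modify q.1 [] (fun ws => ws ++ [q.2]))
            (PySem.Dict.empty : PySem.Dict String (List String))) from
        (List.foldl_map (f := fun p : String × String => (p.2, p.1))
          (g := fun (d : PySem.Dict String (List String)) (q : String × String) =>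
            d.modify q.1 [] (fun ws => ws ++ [q.2])) (l := l) (init := PySem.Dict.empty)).symm]
      rw [PySem.Dict.getD_foldl_modify_append]
      simp only [PySem.Dict.getD_empty, List.nil_append, List.filter_map, List.map_map]
      rfl
    rw [PySem.Dict.items_eq_map_keys _ (by rw [hkeys]; exact PySem.Set.nodup_ofList _) [], hkeys]
    exact List.map_congr_left (fun s _ => by rw [hgetD s])
  show ((l.foldl (fun d p => d.modify p.2 [] (fun ws => ws ++ [p.1]))
      (PySem.Dict.empty : PySem.Dict String (List String))).items.foldl _ PySem.Dict.empty).items = _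
  rw [hs2w, List.foldl_map]
  have hsel : ∀ s ∈ PySem.Set.ofList (l.map (fun p => p.2)),
      (if 1 < (pvGroup l s).length then
          PySem.List.sorted2 (pvGroup l s) (fun w => -(pvCount wc w)) (fun w => PySem.Str.len w)
        else pvGroup l s).headD "" = (pvBest wc (pvGroup l s)).getD "" :=
    fun s hs => pvSel_eq wc _ (pvGroup_ne_nil l s hs)
  have hnodup : ((PySem.Set.ofList (l.map (fun p => p.2))).map
      (fun s => (if 1 < (pvGroup l s).length then
          PySem.List.sorted2 (pvGroup l s) (fun w => -(pvCount wc w)) (fun w => PySem.Str.len w)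
        else pvGroup l s).headD "")).Nodup := by
    rw [List.map_congr_left hsel]
    exact winners_nodup wc l h
  rw [PySem.Dict.items_foldl_insert_fresh _
      (fun s => (if 1 < (pvGroup l s).length then
          PySem.List.sorted2 (pvGroup l s) (fun w => -(pvCount wc w)) (fun w => PySem.Str.len w)
        else pvGroup l s).headD "")
      (fun s => s) PySem.Dict.empty
      (fun a _ => PySem.Dict.contains_empty _) hnodup]
  simp only [show (PySem.Dict.empty : PySem.Dict String String).items = [] from rfl,
    List.nil_append]
  refine List.map_congr_left (fun s hs => ?_)
  rw [hsel s hs]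

-- ===== VERDICT (by name: the statement is the Claim_ definition above) =====
theorem filter_lexicon_py_spec : Claim_equal_filter_lexicon_py := by
  intro lexicon word_counts _ hpre
  unfold Spec_filter_lexicon_py
  rw [a_items word_counts lexicon hpre.1, b_items]
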